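-- pv_equiv track=rewrite | github.com/BadWolf1023/Lounge-Season-Reset-Updater-Bot | common.py | cutoff_display_text
-- ===== SOURCE A (Python) =====
-- from typing import List, Tuple
--
-- def cutoff_display_text(cutoff_data:List[Tuple[int, str, int]]):
--     to_return = []
--
--     last_mmr = None
--     for index, (min_mmr, class_name, _) in enumerate(cutoff_data):
--         if index == 0:
--             to_return.append(f"{class_name} —> {'-Infinity' if min_mmr is None else min_mmr}+ MMR")
--         else:
--             if min_mmr is None:
--                 to_return.append(f"{class_name} —> <{last_mmr} MMR")
--             else:
--                 to_return.append(f"{class_name} —> {min_mmr} - {last_mmr-1} MMR")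
--         last_mmr = min_mmr
--     return "\n".join(reversed(to_return))
-- ===== SOURCE B (Python) =====
-- from typing import List, Tuple
--
-- def cutoff_display_text(cutoff_data:List[Tuple[int, str, int]]):
--     def rest_text(prev, rows):
--         # text for the non-first rows, already in display (reversed) order,
--         # each line followed by "\n"; built by structural recursion, no list.
--         if not rows:
--             return ""
--         min_mmr, class_name, _ = rows[0]
--         if min_mmr is None:
--             line = f"{class_name} —> <{prev} MMR"
--         else:
--             line = f"{class_name} —> {min_mmr} - {prev-1} MMR"
--         return rest_text(min_mmr, rows[1:]) + line + "\n"
--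
--     if not cutoff_data:
--         return ""
--     min_mmr, class_name, _ = cutoff_data[0]
--     first = f"{class_name} —> {'-Infinity' if min_mmr is None else min_mmr}+ MMR"
--     return rest_text(min_mmr, cutoff_data[1:]) + first
-- ===== Notes on version B (the rewrite author's own statement) =====
-- stated objective: alternative
-- what changed: B builds the result string directly by structural recursion on the tail (prepending each recursive result before the current line), so the intermediate line list, the reversed() pass and the '\n'.join all disappear; the first row is handled once outside the recursion.
import Mathlib
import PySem

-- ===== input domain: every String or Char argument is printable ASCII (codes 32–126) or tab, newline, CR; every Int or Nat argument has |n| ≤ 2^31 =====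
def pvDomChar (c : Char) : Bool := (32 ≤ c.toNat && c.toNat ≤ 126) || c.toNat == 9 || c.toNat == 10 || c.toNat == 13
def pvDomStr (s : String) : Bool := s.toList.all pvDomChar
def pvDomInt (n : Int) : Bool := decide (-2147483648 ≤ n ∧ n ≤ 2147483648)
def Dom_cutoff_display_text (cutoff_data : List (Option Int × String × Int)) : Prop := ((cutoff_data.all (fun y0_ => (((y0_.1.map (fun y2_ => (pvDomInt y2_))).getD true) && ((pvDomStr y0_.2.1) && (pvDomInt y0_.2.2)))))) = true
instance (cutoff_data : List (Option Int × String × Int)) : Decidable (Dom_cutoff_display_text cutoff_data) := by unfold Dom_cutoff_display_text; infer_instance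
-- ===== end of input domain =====

-- B builds the result string directly by structural recursion on the tail (recursive result
-- prepended before each line), so the line list, the reversed() pass and the join disappear
-- (objective: alternative).


-- f-string rendering of an Optional[int] value: None → "None", n → str(n)
def pvOptStr : Option Int → String
  | none => "None"
  | some m => PySem.Int.toStr m

-- ===== PORT A =====
-- state: (to_return, last_mmr); 'last_mmr - 1' is written 'st.2.getD 0 - 1' — exact under
-- Pre_cutoff_display_text, which excludes exactly the inputs where Python raises TypeError there.
def cutoff_display_text (cutoff_data : List (Option Int × String × Int)) : String :=
  let r := (PySem.List.enumerate cutoff_data 0).foldl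
    (fun (st : List String × Option Int) p =>
      let line :=
        if p.1 = 0 then
          p.2.2.1 ++ " —> " ++ (match p.2.1 with
            | none => "-Infinity"
            | some m => PySem.Int.toStr m) ++ "+ MMR"
        else
          match p.2.1 with
          | none => p.2.2.1 ++ " —> <" ++ pvOptStr st.2 ++ " MMR"
          | some m => p.2.2.1 ++ " —> " ++ PySem.Int.toStr m ++ " - " ++
              PySem.Int.toStr (st.2.getD 0 - 1) ++ " MMR"
      (st.1 ++ [line], p.2.1))
    ([], none)
  PySem.Str.join "\n" r.1.reverse

-- ===== PORT B =====
-- structural recursion of Source B's rest_text: text of the non-first rows, each line + "\n",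
-- recursive result prepended; 'prev - 1' is '…getD 0 - 1' — exact under Pre_ (B's Python
-- raises TypeError on the same inputs A does, all outside Pre_).
def pvRestText (prev : Option Int) : List (Option Int × String × Int) → String
  | [] => ""
  | r :: rows =>
    let line := match r.1 with
      | none => r.2.1 ++ " —> <" ++ pvOptStr prev ++ " MMR"
      | some m => r.2.1 ++ " —> " ++ PySem.Int.toStr m ++ " - " ++
          PySem.Int.toStr (prev.getD 0 - 1) ++ " MMR"
    pvRestText r.1 rows ++ line ++ "\n"

def cutoff_display_text_alt (cutoff_data : List (Option Int × String × Int)) : String :=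
  match cutoff_data with
  | [] => ""
  | r :: rows =>
    let first := r.2.1 ++ " —> " ++ (match r.1 with
      | none => "-Infinity"
      | some m => PySem.Int.toStr m) ++ "+ MMR"
    pvRestText r.1 rows ++ first

-- ===== PRECONDITION & SPEC =====
-- Pre_ excludes exactly the inputs where Python A raises TypeError ('last_mmr - 1' with
-- last_mmr None): a non-first entry with a numeric min whose predecessor's min is None.
def Pre_cutoff_display_text (cutoff_data : List (Option Int × String × Int)) : Prop :=
  List.IsChain (fun a b => a.1 = none → b.1 = none) cutoff_data
instance (cutoff_data : List (Option Int × String × Int)) : Decidable (Pre_cutoff_display_text cutoff_data) := by unfold Pre_cutoff_display_text; infer_instance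

def pvWitness_cutoff_display_text : (List (Option Int × String × Int)) :=
  [(some 9000, "Grandmaster", 1), (some 5000, "Master", 2), (none, "Iron", 3)]

def Spec_cutoff_display_text (cutoff_data : List (Option Int × String × Int)) (out : String) : Prop := out = cutoff_display_text_alt cutoff_data
instance (cutoff_data : List (Option Int × String × Int)) (out : String) : Decidable (Spec_cutoff_display_text cutoff_data out) := by unfold Spec_cutoff_display_text; infer_instance

-- ===== CLAIM (what is proved, stated in full; the proofs are below) =====
def Claim_equal_cutoff_display_text : Prop := ∀ (cutoff_data : List (Option Int × String × Int)), Dom_cutoff_display_text cutoff_data → Pre_cutoff_display_text cutoff_data → Spec_cutoff_display_text cutoff_data (cutoff_display_text cutoff_data)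

-- ===== LEMMAS AND PROOFS =====

-- the display line for row 'row' at index k, whose predecessor's min is 'prev'
def pvLine (prev : Option Int) (k : Nat) (row : Option Int × String × Int) : String :=
  if k = 0 then
    row.2.1 ++ " —> " ++ (match row.1 with
      | none => "-Infinity"
      | some m => PySem.Int.toStr m) ++ "+ MMR"
  else
    match row.1 with
    | none => row.2.1 ++ " —> <" ++ pvOptStr prev ++ " MMR"
    | some m => row.2.1 ++ " —> " ++ PySem.Int.toStr m ++ " - " ++
        PySem.Int.toStr (prev.getD 0 - 1) ++ " MMR"

-- A's lines, front to back: index k, threading the previous row's min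
def pvLinesFrom : List (Option Int × String × Int) → Nat → Option Int → List String
  | [], _, _ => []
  | r :: rs, k, prev => pvLine prev k r :: pvLinesFrom rs (k + 1) r.1

-- A's fold accumulates exactly pvLinesFrom
theorem pvA_fold (rest : List (Option Int × String × Int)) :
    ∀ (k : Nat) (acc : List String) (prev : Option Int),
    ((PySem.List.enumerate rest (k : Int)).foldl
      (fun (st : List String × Option Int) p =>
        let line :=
          if p.1 = 0 then
            p.2.2.1 ++ " —> " ++ (match p.2.1 with
              | none => "-Infinity"
              | some m => PySem.Int.toStr m) ++ "+ MMR"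
          else
            match p.2.1 with
            | none => p.2.2.1 ++ " —> <" ++ pvOptStr st.2 ++ " MMR"
            | some m => p.2.2.1 ++ " —> " ++ PySem.Int.toStr m ++ " - " ++
                PySem.Int.toStr (st.2.getD 0 - 1) ++ " MMR"
        (st.1 ++ [line], p.2.1))
      (acc, prev)).1 = acc ++ pvLinesFrom rest k prev := by
  induction rest with
  | nil => intro k acc prev; simp [PySem.List.enumerate_nil, pvLinesFrom]
  | cons r rs ih =>
    intro k acc prev
    rw [PySem.List.enumerate_cons]
    have hcast : (k : Int) + 1 = ((k + 1 : Nat) : Int) := by push_cast; ring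
    simp only [List.foldl_cons, hcast, ih (k + 1)]
    simp [pvLinesFrom, pvLine, Int.natCast_eq_zero, List.append_assoc]

-- join over a snoc-snoc tail merges the last separator into the final element (char level)
theorem pv_join_snoc' (xs : List (List Char)) (a s : List Char) :
    ['\n'].intercalate (xs ++ [a, s]) = ['\n'].intercalate (xs ++ [a ++ '\n' :: s]) := by
  induction xs with
  | nil => simp [List.intercalate]
  | cons x xs ih =>
    cases xs with
    | nil => simp_all [List.intercalate]
    | cons y ys => simp_all [List.intercalate]

-- the same at String level
theorem pv_join_snoc (xs : List String) (a s : String) :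
    PySem.Str.join "\n" (xs ++ [a, s]) = PySem.Str.join "\n" (xs ++ [a ++ "\n" ++ s]) := by
  apply String.toList_injective
  simpa [PySem.Str.join, PySem.Chars.join] using
    pv_join_snoc' (xs.map String.toList) a.toList s.toList

-- B's recursion, followed by any final string s, is A's join of the reversed lines ending in s
theorem pvRest_eq (rows : List (Option Int × String × Int)) :
    ∀ (k : Nat) (prev : Option Int) (s : String), k ≠ 0 →
    pvRestText prev rows ++ s =
      PySem.Str.join "\n" ((pvLinesFrom rows k prev).reverse ++ [s]) := by
  induction rows with
  | nil =>
    intro k prev s _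
    simp [pvRestText, pvLinesFrom, PySem.Str.join, PySem.Chars.join, List.intercalate]
  | cons r rs ih =>
    intro k prev s hk
    have hline : pvLine prev k r = (match r.1 with
        | none => r.2.1 ++ " —> <" ++ pvOptStr prev ++ " MMR"
        | some m => r.2.1 ++ " —> " ++ PySem.Int.toStr m ++ " - " ++
            PySem.Int.toStr (prev.getD 0 - 1) ++ " MMR") := by
      simp [pvLine, hk]
    calc pvRestText prev (r :: rs) ++ s
        = pvRestText r.1 rs ++ (pvLine prev k r ++ "\n" ++ s) := by
          simp [pvRestText, hline, String.append_assoc]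
      _ = PySem.Str.join "\n" ((pvLinesFrom rs (k + 1) r.1).reverse ++
            [pvLine prev k r ++ "\n" ++ s]) := ih (k + 1) r.1 _ (by omega)
      _ = PySem.Str.join "\n" ((pvLinesFrom rs (k + 1) r.1).reverse ++
            [pvLine prev k r, s]) := (pv_join_snoc _ _ _).symm
      _ = PySem.Str.join "\n" ((pvLinesFrom (r :: rs) k prev).reverse ++ [s]) := by
          simp [pvLinesFrom]

theorem pvA_eq (cd : List (Option Int × String × Int)) :
    cutoff_display_text cd = PySem.Str.join "\n" (pvLinesFrom cd 0 none).reverse := by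
  have h := pvA_fold cd 0 [] none
  simp only [Nat.cast_zero] at h
  simp only [cutoff_display_text]
  rw [h]
  simp

theorem pvB_eq (cd : List (Option Int × String × Int)) :
    cutoff_display_text_alt cd = PySem.Str.join "\n" (pvLinesFrom cd 0 none).reverse := by
  cases cd with
  | nil => simp [cutoff_display_text_alt, pvLinesFrom, PySem.Str.join, PySem.Chars.join, List.intercalate]
  | cons r rows =>
    simp only [cutoff_display_text_alt]
    rw [pvRest_eq rows 1 r.1 _ one_ne_zero]
    simp [pvLinesFrom, pvLine]

-- ===== VERDICT (by name: the statement is the Claim_ definition above) =====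
theorem cutoff_display_text_spec : Claim_equal_cutoff_display_text := by
  intro cd _ _
  unfold Spec_cutoff_display_text
  rw [pvA_eq, pvB_eq]
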